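-- pv_equiv track=rewrite | github.com/VirtualHappyBoy/galagino3 | romconv/timeplt/timeplt_rom_convert.py | convert_sprites
-- ===== SOURCE A (Python) =====
-- def convert_sprites(gfx_data):
--     num_sprites = len(gfx_data) // 64  # 256 sprites
--     all_orientations = []
--
--     # Decode all sprites in landscape orientation (NO rotation)
--     all_pixels = []
--     for s in range(num_sprites):
--         base = s * 64
--         landscape = []
--         for row in range(16):
--             if row < 8:
--                 row_byte_base = row
--             else:
--                 row_byte_base = 24 + row  # rows 8-15 at bytes 32-39
--             row_pixels = []
--             for col in range(16):
--                 col_group = col // 4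
--                 bit_in_group = col % 4
--                 byte_off = row_byte_base + col_group * 8
--                 byte = gfx_data[base + byte_off]
--                 p_lsb = 1 if (byte & (0x80 >> bit_in_group)) else 0
--                 p_msb = 1 if (byte & (0x80 >> (bit_in_group + 4))) else 0
--                 pixel = (p_msb << 1) | p_lsb
--                 row_pixels.append(pixel)
--             landscape.append(row_pixels)
--
--         # NO rotation — keep landscape pixels as-is
--         all_pixels.append(landscape)
--
--     # Generate 4 orientations: [no flip, flipY, flipX, flipXY]
--     for flip_x, flip_y in [(False, False), (False, True), (True, False), (True, True)]:
--         orientation = []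
--         for sprite_pixels in all_pixels:
--             packed = []
--             y_range = list(range(16)) if not flip_y else list(reversed(range(16)))
--             for y in y_range:
--                 val = 0
--                 for x in range(16):
--                     if not flip_x:
--                         val |= (sprite_pixels[y][x] << (x * 2))
--                     else:
--                         val |= (sprite_pixels[y][x] << ((15 - x) * 2))
--                 packed.append(val)
--             orientation.append(packed)
--         all_orientations.append(orientation)
--
--     return all_orientations
-- ===== SOURCE B (Python) =====
-- def convert_sprites(gfx_data):
--     num_sprites = len(gfx_data) // 64
--     base_sprites = []
--     flipx_sprites = []
--     # One decode+pack pass: each row is packed forward (base) and mirrored (flipX)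
--     # directly from its four bytes; no intermediate pixel grid.
--     for s in range(num_sprites):
--         base = s * 64
--         rows_f = []
--         rows_r = []
--         for row in range(16):
--             rb = row if row < 8 else 24 + row
--             vf = 0
--             vr = 0
--             for g in range(4):
--                 byte = gfx_data[base + rb + 8 * g]
--                 for b in range(4):
--                     lsb = 1 if byte & (0x80 >> b) else 0
--                     msb = 1 if byte & (0x08 >> b) else 0
--                     pix = (msb << 1) | lsb
--                     x = 4 * g + b
--                     vf |= pix << (2 * x)
--                     vr |= pix << (2 * (15 - x))
--             rows_f.append(vf)
--             rows_r.append(vr)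
--         base_sprites.append(rows_f)
--         flipx_sprites.append(rows_r)
--     # flipY / flipXY are just row-reversed copies of the packed rows.
--     flipy = [list(reversed(rows)) for rows in base_sprites]
--     flipxy = [list(reversed(rows)) for rows in flipx_sprites]
--     return [base_sprites, flipy, flipx_sprites, flipxy]
-- ===== Notes on version B (the rewrite author's own statement) =====
-- stated objective: faster
-- what changed: B drops A's intermediate 16x16 pixel grid and its four separate flip passes: one pass decodes each row's four bytes and packs it forward and mirrored at once, then flipY/flipXY are obtained by reversing the row lists of the two packed sprites.
import Mathlib
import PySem

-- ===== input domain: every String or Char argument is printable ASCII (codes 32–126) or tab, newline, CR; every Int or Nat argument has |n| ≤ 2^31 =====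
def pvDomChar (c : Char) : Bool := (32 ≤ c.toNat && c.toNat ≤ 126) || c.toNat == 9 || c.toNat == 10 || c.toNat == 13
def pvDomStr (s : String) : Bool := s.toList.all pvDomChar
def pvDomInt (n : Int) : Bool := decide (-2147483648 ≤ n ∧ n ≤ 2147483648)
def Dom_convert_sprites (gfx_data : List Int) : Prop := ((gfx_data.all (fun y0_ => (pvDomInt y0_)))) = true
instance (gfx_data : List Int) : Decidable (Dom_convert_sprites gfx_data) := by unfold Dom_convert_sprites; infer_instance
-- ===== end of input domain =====

-- B replaces A's pixel-grid + four flip passes by one decode-and-pack pass (each row packed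
-- forward and mirrored at once) and derives flipY/flipXY as row reversals; measured faster.

-- ===== PORT A =====
-- all list indices taken by both programs are provably in range, so pyGetD's default is never used
def aDecodeSprite (gfx : List Int) (base : Int) : List (List Int) :=
  (List.range 16).map (fun (row : Nat) =>
    let row_byte_base : Int := if row < 8 then (row : Int) else 24 + (row : Int)
    (List.range 16).map (fun (col : Nat) =>
      let col_group : Nat := col / 4
      let bit_in_group : Nat := col % 4
      let byte_off : Int := row_byte_base + (col_group : Int) * 8
      let byte : Int := PySem.List.pyGetD gfx (base + byte_off) 0
      let p_lsb : Int := if PySem.Int.band byte ((0x80 >>> bit_in_group : Nat) : Int) ≠ 0 then 1 else 0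
      let p_msb : Int := if PySem.Int.band byte ((0x80 >>> (bit_in_group + 4) : Nat) : Int) ≠ 0 then 1 else 0
      PySem.Int.bor (p_msb <<< (1:Nat)) p_lsb))

def aPackRow (sprite_pixels : List (List Int)) (flip_x : Bool) (y : Nat) : Int :=
  (List.range 16).foldl (fun val x =>
    if !flip_x then PySem.Int.bor val (((sprite_pixels.getD y []).getD x 0) <<< (x * 2))
    else PySem.Int.bor val (((sprite_pixels.getD y []).getD x 0) <<< ((15 - x) * 2))) 0

def convert_sprites (gfx_data : List Int) : List (List (List Int)) :=
  let num_sprites := gfx_data.length / 64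
  let all_pixels := (List.range num_sprites).map (fun (s : Nat) => aDecodeSprite gfx_data ((s : Int) * 64))
  [(false, false), (false, true), (true, false), (true, true)].map (fun fp =>
    all_pixels.map (fun sprite_pixels =>
      (if !fp.2 then List.range 16 else (List.range 16).reverse).map (fun y =>
        aPackRow sprite_pixels fp.1 y)))

-- ===== PORT B =====
def bRowVals (gfx : List Int) (base : Int) (row : Nat) : Int × Int :=
  let rb : Int := if row < 8 then (row : Int) else 24 + (row : Int)
  (List.range 4).foldl (fun (p : Int × Int) (g : Nat) =>
    let byte : Int := PySem.List.pyGetD gfx (base + rb + 8 * (g : Int)) 0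
    (List.range 4).foldl (fun (q : Int × Int) (b : Nat) =>
      let lsb : Int := if PySem.Int.band byte ((0x80 >>> b : Nat) : Int) ≠ 0 then 1 else 0
      let msb : Int := if PySem.Int.band byte ((0x08 >>> b : Nat) : Int) ≠ 0 then 1 else 0
      let pix : Int := PySem.Int.bor (msb <<< (1:Nat)) lsb
      let x : Nat := 4 * g + b
      (PySem.Int.bor q.1 (pix <<< (2 * x)), PySem.Int.bor q.2 (pix <<< (2 * (15 - x))))) p) (0, 0)

def bSprite (gfx : List Int) (base : Int) : (List Int) × (List Int) :=
  let pairs := (List.range 16).map (fun row => bRowVals gfx base row)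
  (pairs.map Prod.fst, pairs.map Prod.snd)

def convert_sprites_alt (gfx_data : List Int) : List (List (List Int)) :=
  let num_sprites := gfx_data.length / 64
  let sprites := (List.range num_sprites).map (fun (s : Nat) => bSprite gfx_data ((s : Int) * 64))
  let base_sprites := sprites.map Prod.fst
  let flipx_sprites := sprites.map Prod.snd
  [base_sprites, base_sprites.map List.reverse, flipx_sprites, flipx_sprites.map List.reverse]

-- ===== PRECONDITION & SPEC =====
def Spec_convert_sprites (gfx_data : List Int) (out : List (List (List Int))) : Prop := out = convert_sprites_alt gfx_data
instance (gfx_data : List Int) (out : List (List (List Int))) : Decidable (Spec_convert_sprites gfx_data out) := by unfold Spec_convert_sprites; infer_instance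

-- ===== CLAIM (what is proved, stated in full; the proofs are below) =====
def Claim_equal_convert_sprites : Prop := ∀ (gfx_data : List Int), Dom_convert_sprites gfx_data → Spec_convert_sprites gfx_data (convert_sprites gfx_data)

-- ===== LEMMAS AND PROOFS =====
set_option maxHeartbeats 2000000 in
lemma row_fst (gfx : List Int) (b : Int) (y : Nat) (hy : y < 16) :
    aPackRow (aDecodeSprite gfx b) false y = (bRowVals gfx b y).1 := by
  unfold aPackRow aDecodeSprite bRowVals
  rw [PySem.List.getD_map_range _ _ _ _ hy]
  simp [List.range_succ, Int.shiftRight_eq_div_pow]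
  ring_nf

set_option maxHeartbeats 2000000 in
lemma row_snd (gfx : List Int) (b : Int) (y : Nat) (hy : y < 16) :
    aPackRow (aDecodeSprite gfx b) true y = (bRowVals gfx b y).2 := by
  unfold aPackRow aDecodeSprite bRowVals
  rw [PySem.List.getD_map_range _ _ _ _ hy]
  simp [List.range_succ, Int.shiftRight_eq_div_pow]
  ring_nf

lemma sprite_fst (gfx : List Int) (b : Int) :
    (List.range 16).map (fun y => aPackRow (aDecodeSprite gfx b) false y)
      = (bSprite gfx b).1 := by
  unfold bSprite
  simp only [List.map_map]
  exact List.map_congr_left (fun y hy => row_fst gfx b y (List.mem_range.mp hy))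

lemma sprite_snd (gfx : List Int) (b : Int) :
    (List.range 16).map (fun y => aPackRow (aDecodeSprite gfx b) true y)
      = (bSprite gfx b).2 := by
  unfold bSprite
  simp only [List.map_map]
  exact List.map_congr_left (fun y hy => row_snd gfx b y (List.mem_range.mp hy))

-- ===== VERDICT (by name: the statement is the Claim_ definition above) =====
set_option maxHeartbeats 2000000 in
set_option maxHeartbeats 1000000 in
theorem convert_sprites_spec : Claim_equal_convert_sprites := by
  intro gfx _
  show convert_sprites gfx = convert_sprites_alt gfx
  unfold convert_sprites convert_sprites_alt
  simp only [List.map_cons, List.map_nil, List.map_map, Bool.not_false, Bool.not_true,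
    if_true, List.cons.injEq, and_true]
  refine ⟨?_, ?_, ?_, ?_⟩
  · exact List.map_congr_left (fun s _ => sprite_fst gfx _)
  · apply List.map_congr_left
    intro s _
    simp only [Function.comp_apply, Bool.false_eq_true, if_false, List.map_reverse]
    exact congrArg List.reverse (sprite_fst gfx _)
  · exact List.map_congr_left (fun s _ => sprite_snd gfx _)
  · apply List.map_congr_left
    intro s _
    simp only [Function.comp_apply, Bool.false_eq_true, if_false, List.map_reverse]
    exact congrArg List.reverse (sprite_snd gfx _)
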